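-- pv_equiv track=rewrite | github.com/mhurhangee/wrdyl | wrdyl.py | find_all_indexes
-- ===== SOURCE A (Python) =====
-- def find_all_indexes(string, char) -> list:
-- 	indexes = []
-- 	try:
-- 		index = string.index(char)
-- 		while True:
-- 			indexes.append(index)
-- 			index = string.index(char, index + 1)
-- 	except ValueError:
-- 		pass
-- 	return indexes
-- ===== SOURCE B (Python) =====
-- def find_all_indexes(string, char) -> list:
-- 	n, m = len(string), len(char)
-- 	return [i for i in range(n - m + 1) if string[i:i+m] == char]
-- ===== Notes on version B (the rewrite author's own statement) =====
-- stated objective: simpler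
-- what changed: Replaced A's try/except loop of repeated str.index(char, index+1) calls with a single comprehension that slides a window over all start positions and keeps i whenever string[i:i+m] == char.
import Mathlib
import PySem

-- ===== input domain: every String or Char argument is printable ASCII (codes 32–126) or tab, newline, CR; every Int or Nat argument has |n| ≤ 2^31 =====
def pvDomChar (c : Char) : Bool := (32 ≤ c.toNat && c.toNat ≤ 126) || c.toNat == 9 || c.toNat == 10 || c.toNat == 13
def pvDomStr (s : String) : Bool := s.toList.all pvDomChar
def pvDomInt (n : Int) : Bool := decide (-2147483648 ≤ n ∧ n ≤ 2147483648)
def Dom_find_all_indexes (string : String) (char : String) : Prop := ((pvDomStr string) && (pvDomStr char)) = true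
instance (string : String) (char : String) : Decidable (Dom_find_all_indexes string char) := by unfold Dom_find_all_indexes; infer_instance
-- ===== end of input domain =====

-- B replaces A's try/except loop of repeated str.index calls with a sliding-window
-- scan over all start positions (objective: simpler).


-- ===== PORT A =====
-- A's while-True loop: append the current index, then search again from index+1;
-- str.index raising ValueError = findFrom returning -1.  The fuel only bounds the
-- (finite) number of iterations; it is never reached with fuel = |s| + 1.
def goA (s c : List Char) (idx : Int) (acc : List Int) : Nat → List Int
  | 0 => acc
  | fuel+1 =>
    let acc2 := acc ++ [idx]
    let j := PySem.Chars.findFrom s c (idx + 1) none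
    if j = -1 then acc2 else goA s c j acc2 fuel

def find_all_indexes (string : String) (char : String) : List Int :=
  let s := string.toList
  let c := char.toList
  let i := PySem.Chars.find s c
  if i = -1 then [] else goA s c i [] (s.length + 1)

-- ===== PORT B =====
-- B's window test: string[i:i+m] == char
def occAt (s c : List Char) (i : Int) : Bool :=
  PySem.List.slice s (some i) (some (i + (c.length : Int))) == c

def find_all_indexes_alt (string : String) (char : String) : List Int :=
  (PySem.List.pyRange 0 ((string.toList.length : Int) - (char.toList.length : Int) + 1) 1).filter
    (occAt string.toList char.toList)

-- ===== PRECONDITION & SPEC =====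
def Spec_find_all_indexes (string : String) (char : String) (out : List Int) : Prop := out = find_all_indexes_alt string char
instance (string : String) (char : String) (out : List Int) : Decidable (Spec_find_all_indexes string char out) := by unfold Spec_find_all_indexes; infer_instance

-- ===== CLAIM (what is proved, stated in full; the proofs are below) =====
def Claim_equal_find_all_indexes : Prop := ∀ (string : String) (char : String), Dom_find_all_indexes string char → Spec_find_all_indexes string char (find_all_indexes string char)

-- ===== LEMMAS AND PROOFS =====

-- B's window test at a Nat position is exactly "c occurs (as a prefix) at i".
lemma occAt_iff (s c : List Char) (i : Nat) :
    occAt s c (i : Int) = true ↔ c <+: s.drop i := by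
  unfold occAt
  rw [show ((i : Int) + (c.length : Int)) = ((i + c.length : Nat) : Int) by push_cast; ring]
  rw [PySem.List.slice_natCast, Nat.add_sub_cancel_left]
  rw [beq_iff_eq]
  constructor
  · intro h; rw [← h]; exact List.take_prefix _ _
  · intro h
    exact (List.prefix_iff_eq_take.mp h).symm

-- an occurrence at j fits inside s
lemma occ_fits (s c : List Char) (j : Nat) (h : c <+: s.drop j) (hj : j ≤ s.length) :
    j + c.length ≤ s.length := by
  have := h.length_le
  simp [List.length_drop] at this
  omega

-- no occurrence in [a, b) ⇒ B's filter over that range is empty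
lemma filt_nil' (s c : List Char) (a b : Int) (ha : 0 ≤ a)
    (h : ∀ i : Nat, a ≤ (i : Int) → (i : Int) < b → ¬ c <+: s.drop i) :
    (PySem.List.pyRange a b 1).filter (occAt s c) = [] := by
  rw [List.filter_eq_nil_iff]
  intro x hx
  have hm := (PySem.List.mem_pyRange_one).mp hx
  have hx0 : 0 ≤ x := le_trans ha hm.1
  intro hocc
  have hx' : x = ((x.toNat : Nat) : Int) := by omega
  rw [hx'] at hocc
  exact h x.toNat (by omega) (by omega) ((occAt_iff s c x.toNat).mp hocc)

-- no occurrence at or after a ⇒ B's filter over [a, …) is empty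
lemma filt_nil (s c : List Char) (a : Int) (ha : 0 ≤ a)
    (h : ∀ i : Nat, a ≤ (i : Int) → ¬ c <+: s.drop i) :
    (PySem.List.pyRange a ((s.length : Int) - (c.length : Int) + 1) 1).filter (occAt s c) = [] := by
  rw [List.filter_eq_nil_iff]
  intro x hx
  have hm := (PySem.List.mem_pyRange_one).mp hx
  have hx0 : 0 ≤ x := le_trans ha hm.1
  intro hocc
  have hx' : x = ((x.toNat : Nat) : Int) := by omega
  rw [hx'] at hocc
  exact h x.toNat (by omega) ((occAt_iff s c x.toNat).mp hocc)

-- drop-relative infix: c somewhere in s.drop k ⇔ a prefix-occurrence at some i ≥ k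
lemma no_occ_of_not_infix (s c : List Char) (k : Nat)
    (h : ¬ c <:+: s.drop k) : ∀ i : Nat, k ≤ i → ¬ c <+: s.drop i := by
  intro i hi hocc
  apply h
  rw [← PySem.Chars.isIn_iff_infix]
  apply (PySem.Chars.exists_prefix_drop_iff_isIn c (s.drop k)).mp
  refine ⟨i - k, ?_⟩
  rw [List.drop_drop]
  rwa [show k + (i - k) = i by omega]

-- main loop invariant: from a found occurrence j, A's loop emits exactly
-- B's filtered range starting at j.
lemma goA_eq (s c : List Char) : ∀ (fuel : Nat) (j : Nat) (acc : List Int),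
    c <+: s.drop j → j ≤ s.length → s.length + 1 - j ≤ fuel →
    goA s c (j : Int) acc fuel
      = acc ++ (PySem.List.pyRange (j : Int) ((s.length : Int) - (c.length : Int) + 1) 1).filter (occAt s c) := by
  intro fuel
  induction fuel with
  | zero => intro j acc _ hj hf; omega
  | succ fuel ih =>
    intro j acc hocc hj hf
    have hfit : j + c.length ≤ s.length := occ_fits s c j hocc hj
    have hjB : (j : Int) < (s.length : Int) - (c.length : Int) + 1 := by omega
    rw [goA]
    rw [PySem.List.pyRange_one_cons hjB]
    rw [List.filter_cons]
    rw [if_pos ((occAt_iff s c j).mpr hocc)]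
    rw [show (j : Int) + 1 = ((j + 1 : Nat) : Int) by push_cast; ring]
    by_cases hcase : (j + 1 : Nat) ≤ s.length
    · -- search restarts inside the string
      by_cases hneg : PySem.Chars.findFrom s c ((j + 1 : Nat) : Int) none = -1
      · rw [if_pos hneg]
        have hni : ¬ c <:+: s.drop (j + 1) :=
          (PySem.Chars.findFrom_natCast_eq_neg_one_iff s c (j+1) hcase).mp hneg
        rw [filt_nil s c ((j+1 : Nat) : Int) (by positivity)
              (fun i hi => no_occ_of_not_infix s c (j+1) hni i (by exact_mod_cast hi))]
      · rw [if_neg hneg]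
        obtain ⟨hle, hpre, hmin⟩ := PySem.Chars.findFrom_natCast_spec s c (j+1) hcase hneg
        set r := PySem.Chars.findFrom s c ((j + 1 : Nat) : Int) none with hr
        have hr0 : 0 ≤ r := le_trans (by positivity) hle
        have hrn : r = ((r.toNat : Nat) : Int) := by omega
        have hjlt : j + 1 ≤ r.toNat := by omega
        have hrlen : r.toNat ≤ s.length := by
          have heq := PySem.Chars.findFrom_natCast s c (j+1) hcase
          rw [← hr] at heq
          by_cases hfin : PySem.Chars.find (s.drop (j+1)) c = -1
          · rw [heq, if_pos hfin] at hrn; omega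
          · have hfl := PySem.Chars.find_le_length (s.drop (j+1)) c
            rw [if_neg hfin] at heq
            simp [List.length_drop] at hfl
            omega
        rw [hrn]
        rw [ih r.toNat (acc ++ [(j:Int)]) hpre hrlen (by omega)]
        have hrB : ((r.toNat : Nat) : Int) ≤ (s.length : Int) - (c.length : Int) + 1 := by
          have := occ_fits s c r.toNat hpre hrlen
          omega
        rw [PySem.List.pyRange_one_append ((j+1 : Nat) : Int) ((r.toNat : Nat) : Int)
              ((s.length : Int) - (c.length : Int) + 1) (by omega) hrB]
        rw [List.filter_append]
        rw [filt_nil' s c ((j+1 : Nat) : Int) ((r.toNat:Nat):Int) (by positivity)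
              (fun i h1 h2 => hmin i (by exact_mod_cast h1) (by exact_mod_cast h2))]
        simp
    · -- j = s.length: restart past the end, findFrom gives -1 (CPython quirk)
      have hjn : j = s.length := by omega
      have hpast : PySem.Chars.findFrom s c ((j + 1 : Nat) : Int) none = -1 := by
        unfold PySem.Chars.findFrom
        rw [if_pos (by push_cast; omega)]
      rw [if_pos hpast]
      rw [PySem.List.pyRange_one_eq_nil (by omega)]
      simp

theorem find_all_indexes_spec : Claim_equal_find_all_indexes := by
  intro string char _
  unfold Spec_find_all_indexes find_all_indexes find_all_indexes_alt
  set s := string.toList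
  set c := char.toList
  by_cases h : PySem.Chars.find s c = -1
  · rw [if_pos h]
    have hni : ¬ c <:+: s := (PySem.Chars.find_eq_neg_one_iff s c).mp h
    rw [filt_nil s c 0 le_rfl (fun i _ => no_occ_of_not_infix s c 0 (by simpa using hni) i (Nat.zero_le i))]
  · rw [if_neg h]
    have h0 : 0 ≤ PySem.Chars.find s c := by
      have := PySem.Chars.neg_one_le_find (s := s) (sub := c)
      omega
    obtain ⟨hpre, hmin⟩ := PySem.Chars.find_spec (s := s) (sub := c) h0
    set i0 := PySem.Chars.find s c with hi0
    have hi0n : i0 = ((i0.toNat : Nat) : Int) := by omega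
    have hlen : i0.toNat ≤ s.length := by
      have := PySem.Chars.find_le_length s c
      rw [← hi0] at this
      omega
    rw [hi0n]
    rw [goA_eq s c (s.length + 1) i0.toNat [] hpre hlen (by omega)]
    have hB : ((i0.toNat : Nat) : Int) ≤ (s.length : Int) - (c.length : Int) + 1 := by
      have := occ_fits s c i0.toNat hpre hlen
      omega
    rw [PySem.List.pyRange_one_append 0 ((i0.toNat : Nat) : Int)
          ((s.length : Int) - (c.length : Int) + 1) (by omega) hB]
    rw [List.filter_append]
    rw [filt_nil' s c 0 ((i0.toNat:Nat):Int) (by omega) (fun i h1 h2 => hmin i (by omega))]
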